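-- pv_equiv track=rewrite | github.com/ProcessControl-JC/demo-dupon-foodtech | solidedge_bom_import/wizard/solidedge_bom_import_wizard.py | _build_dryrun_html
-- ===== SOURCE A (Python) =====
-- def _build_dryrun_html(rows):
--     """Build a dry-run result message (no writes performed)."""
--     level_counts = {}
--     for row in rows:
--         level_counts[row["level"]] = level_counts.get(row["level"], 0) + 1
--     level_summary = ", ".join(
--         f"L{k}: {v} rows" for k, v in sorted(level_counts.items())
--     )
--     return (
--         "<h3>Dry Run — No changes saved</h3>"
--         f"<p>{len(rows)} rows parsed successfully. {level_summary}.</p>"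
--         "<p style='color:#28a745;'>Validation passed. "
--         "Uncheck <strong>Validate only</strong> and click <strong>Import</strong> "
--         "to perform the actual import.</p>"
--     )
-- ===== SOURCE B (Python) =====
-- def _build_dryrun_html(rows):
--     """Build a dry-run result message (no writes performed)."""
--     ordered = sorted(rows, key=lambda r: r["level"])
--     parts = []
--     i = 0
--     n = len(ordered)
--     while i < n:
--         level = ordered[i]["level"]
--         j = i + 1
--         while j < n and ordered[j]["level"] == level:
--             j += 1
--         parts.append(f"L{level}: {j - i} rows")
--         i = j
--     level_summary = ", ".join(parts)
--     return (
--         "<h3>Dry Run — No changes saved</h3>"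
--         f"<p>{len(rows)} rows parsed successfully. {level_summary}.</p>"
--         "<p style='color:#28a745;'>Validation passed. "
--         "Uncheck <strong>Validate only</strong> and click <strong>Import</strong> "
--         "to perform the actual import.</p>"
--     )
-- ===== Notes on version B (the rewrite author's own statement) =====
-- stated objective: alternative
-- what changed: Replaces the dict-of-counts plus key-sort with sorting the rows by level once and emitting each group's run length in a single grouped scan over the sorted list.
import Mathlib
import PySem

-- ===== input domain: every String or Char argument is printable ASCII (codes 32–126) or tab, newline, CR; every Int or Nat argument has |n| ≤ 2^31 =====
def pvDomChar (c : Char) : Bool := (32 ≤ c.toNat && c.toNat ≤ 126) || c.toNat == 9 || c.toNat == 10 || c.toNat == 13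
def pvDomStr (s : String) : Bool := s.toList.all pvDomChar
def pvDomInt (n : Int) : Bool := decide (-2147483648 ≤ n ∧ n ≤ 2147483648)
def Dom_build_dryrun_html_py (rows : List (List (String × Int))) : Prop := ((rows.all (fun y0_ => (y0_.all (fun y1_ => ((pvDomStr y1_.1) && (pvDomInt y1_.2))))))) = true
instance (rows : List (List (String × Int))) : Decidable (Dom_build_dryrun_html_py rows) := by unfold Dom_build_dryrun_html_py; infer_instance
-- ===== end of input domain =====

-- B replaces A's dict-of-counts + key-sort with sort-rows-by-level then one grouped
-- run-length scan (alternative algorithm, same output byte for byte).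

-- row["level"] (both programs read rows the same way); default 0 is never used under Pre_
def pyLevel (row : List (String × Int)) : Int :=
  (PySem.Dict.mk row).getD "level" 0

-- ===== PORT A =====
def build_dryrun_html_py (rows : List (List (String × Int))) : String :=
  let level_counts : PySem.Dict Int Int :=
    rows.foldl (fun d row => d.insert (pyLevel row) (d.getD (pyLevel row) 0 + 1)) PySem.Dict.empty
  let level_summary :=
    PySem.Str.join ", " ((PySem.List.sorted2 level_counts.items Prod.fst Prod.snd).map
      (fun kv => "L" ++ PySem.Int.toStr kv.1 ++ ": " ++ PySem.Int.toStr kv.2 ++ " rows"))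
  "<h3>Dry Run — No changes saved</h3>" ++
    ("<p>" ++ PySem.Int.toStr (rows.length : Int) ++ " rows parsed successfully. " ++
      level_summary ++ ".</p>") ++
    "<p style='color:#28a745;'>Validation passed. " ++
    "Uncheck <strong>Validate only</strong> and click <strong>Import</strong> " ++
    "to perform the actual import.</p>"

-- ===== PORT B =====
-- the outer while loop of Source B: one summary string per run of equal levels
-- (the inner while loop counting the run is the takeWhile, advancing i to j is the dropWhile)
def pvRuns : List (List (String × Int)) → List String
  | [] => []
  | r :: t =>
    ("L" ++ PySem.Int.toStr (pyLevel r) ++ ": " ++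
      PySem.Int.toStr (1 + ((t.takeWhile (fun x => pyLevel x == pyLevel r)).length : Int)) ++
      " rows")
      :: pvRuns (t.dropWhile (fun x => pyLevel x == pyLevel r))
  termination_by l => l.length
  decreasing_by
    exact Nat.lt_succ_of_le (List.Sublist.length_le (List.dropWhile_sublist _))

def build_dryrun_html_py_alt (rows : List (List (String × Int))) : String :=
  let ordered := PySem.List.sorted rows pyLevel
  let level_summary := PySem.Str.join ", " (pvRuns ordered)
  "<h3>Dry Run — No changes saved</h3>" ++
    ("<p>" ++ PySem.Int.toStr (rows.length : Int) ++ " rows parsed successfully. " ++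
      level_summary ++ ".</p>") ++
    "<p style='color:#28a745;'>Validation passed. " ++
    "Uncheck <strong>Validate only</strong> and click <strong>Import</strong> " ++
    "to perform the actual import.</p>"

-- ===== PRECONDITION & SPEC =====
-- Pre_ excludes exactly the rows lacking a "level" key, on which Python's row["level"] raises KeyError.
def Pre_build_dryrun_html_py (rows : List (List (String × Int))) : Prop :=
  ∀ row ∈ rows, (PySem.Dict.mk row).contains "level" = true
instance (rows : List (List (String × Int))) : Decidable (Pre_build_dryrun_html_py rows) := by
  unfold Pre_build_dryrun_html_py; infer_instance

def pvWitness_build_dryrun_html_py : (List (List (String × Int))) :=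
  [[("level", 1)], [("level", 2), ("qty", 3)], [("level", 1)]]

def Spec_build_dryrun_html_py (rows : List (List (String × Int))) (out : String) : Prop := out = build_dryrun_html_py_alt rows
instance (rows : List (List (String × Int))) (out : String) : Decidable (Spec_build_dryrun_html_py rows out) := by unfold Spec_build_dryrun_html_py; infer_instance

-- ===== CLAIM (what is proved, stated in full; the proofs are below) =====
def Claim_equal_build_dryrun_html_py : Prop := ∀ (rows : List (List (String × Int))), Dom_build_dryrun_html_py rows → Pre_build_dryrun_html_py rows → Spec_build_dryrun_html_py rows (build_dryrun_html_py rows)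

-- ===== LEMMAS AND PROOFS =====

-- insertBy only looks at `before x ·`, so agreeing comparators insert alike
theorem pv_insertBy_congr {α : Type} (b1 b2 : α → α → Bool) (x : α) :
    ∀ ys : List α, (∀ y ∈ ys, b1 x y = b2 x y) →
      PySem.List.insertBy b1 x ys = PySem.List.insertBy b2 x ys
  | [], _ => rfl
  | y :: t, h => by
    simp only [PySem.List.insertBy]
    rw [h y (by simp)]
    by_cases hb : b2 x y = true
    · simp [hb]
    · simp only [Bool.not_eq_true] at hb
      simp [hb, pv_insertBy_congr b1 b2 x t (fun z hz => h z (by simp [hz]))]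

theorem pv_foldl_insertBy_congr {α : Type} (b1 b2 : α → α → Bool) (P : α → Prop)
    (hb : ∀ a b, P a → P b → b1 a b = b2 a b) :
    ∀ (xs acc : List α), (∀ y ∈ acc, P y) → (∀ y ∈ xs, P y) →
      xs.foldl (fun acc x => PySem.List.insertBy b1 x acc) acc
        = xs.foldl (fun acc x => PySem.List.insertBy b2 x acc) acc
  | [], _, _, _ => rfl
  | x :: t, acc, hacc, hxs => by
    simp only [List.foldl_cons]
    rw [pv_insertBy_congr b1 b2 x acc (fun y hy => hb x y (hxs x (by simp)) (hacc y hy))]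
    exact pv_foldl_insertBy_congr b1 b2 P hb t _
      (fun y hy => ((PySem.List.mem_insertBy b2 x y acc).1 hy).elim
        (fun e => e ▸ hxs x (by simp)) (fun hm => hacc y hm))
      (fun y hy => hxs y (by simp [hy]))

-- on pairs with distinct first components Python's tuple sort is a sort by first component
theorem pv_sorted2_eq_sorted_fst (xs : List (Int × Int))
    (h : ∀ a ∈ xs, ∀ b ∈ xs, a.1 = b.1 → a = b) :
    PySem.List.sorted2 xs Prod.fst Prod.snd = PySem.List.sorted xs Prod.fst := by
  simp only [PySem.List.sorted2, PySem.List.sorted, if_neg (by decide : ¬ (false = true))]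
  apply pv_foldl_insertBy_congr _ _ (fun a => a ∈ xs)
  · intro a b ha hb
    rcases lt_trichotomy a.1 b.1 with hlt | heq | hgt
    · simp [hlt]
    · have hab : a = b := h a ha b hb heq
      subst hab
      simp
    · simp [hgt, not_lt.2 (le_of_lt hgt)]
  · intro y hy; exact absurd hy (List.not_mem_nil)
  · exact fun y hy => hy

theorem pv_foldl_add_sublist {α : Type} [BEq α] :
    ∀ (xs acc : List α), (xs.foldl PySem.Set.add acc).Sublist (acc ++ xs)
  | [], acc => by simp
  | x :: t, acc => by
    simp only [List.foldl_cons]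
    refine (pv_foldl_add_sublist t (PySem.Set.add acc x)).trans ?_
    unfold PySem.Set.add
    by_cases hc : PySem.Set.contains acc x = true
    · simp only [hc, if_true]
      exact List.Sublist.append (List.Sublist.refl acc) (List.sublist_cons_self x t)
    · simp only [hc, if_false, Bool.false_eq_true]
      simp [List.append_assoc]

theorem pv_ofList_sublist {α : Type} [BEq α] (xs : List α) :
    (PySem.Set.ofList xs).Sublist xs := by
  rw [PySem.Set.ofList_eq_foldl]
  simpa using pv_foldl_add_sublist xs []

theorem pv_ofList_cons_self (k : Int) (l : List Int) :
    PySem.Set.ofList (k :: k :: l) = PySem.Set.ofList (k :: l) := by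
  rw [PySem.Set.ofList_cons, PySem.Set.ofList_cons]
  congr 1
  simp [PySem.Set.discard, List.filter_filter]

theorem pv_ofList_cons_run (k : Int) (run : List Int) :
    ∀ (rest : List Int), (∀ x ∈ run, x = k) → k ∉ rest →
      PySem.Set.ofList (k :: (run ++ rest)) = k :: PySem.Set.ofList rest := by
  induction run with
  | nil =>
    intro rest _ hk
    rw [List.nil_append, PySem.Set.ofList_cons]
    congr 1
    unfold PySem.Set.discard
    apply List.filter_eq_self.mpr
    intro y hy
    have hyr : y ∈ rest := (PySem.Set.mem_ofList rest y).1 hy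
    simp only [Bool.not_eq_eq_eq_not, Bool.not_true, beq_eq_false_iff_ne, ne_eq]
    exact fun e => hk (e ▸ hyr)
  | cons x run' ih =>
    intro rest hr hk
    have hx : x = k := hr x (by simp)
    subst hx
    rw [List.cons_append, pv_ofList_cons_self]
    exact ih rest (fun y hy => hr y (by simp [hy])) hk

-- after a run of k's in a ≤-sorted tail whose elements all dominate k, k never reappears
theorem pv_not_mem_dropWhile (k : Int) :
    ∀ t : List Int, (∀ y ∈ t, k ≤ y) → t.Pairwise (· ≤ ·) →
      k ∉ t.dropWhile (fun x => x == k)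
  | [], _, _ => by simp
  | x :: t, hge, hp => by
    by_cases hx : (x == k) = true
    · simp only [List.dropWhile_cons, hx, if_true]
      exact pv_not_mem_dropWhile k t (fun y hy => hge y (by simp [hy])) (List.pairwise_cons.1 hp).2
    · simp only [List.dropWhile_cons, hx, Bool.false_eq_true, if_false]
      intro hmem
      have hkx : k < x :=
        lt_of_le_of_ne (hge x (by simp)) (fun e => hx (by simp [e.symm]))
      rcases List.mem_cons.1 hmem with he | hm
      · exact absurd he.symm (ne_of_gt hkx)
      · exact absurd ((List.pairwise_cons.1 hp).1 k hm) (not_le.2 hkx)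

-- the grouped scan over levels only (pvRuns with the row structure stripped)
def pvGrpL : List Int → List String
  | [] => []
  | k :: t =>
    ("L" ++ PySem.Int.toStr k ++ ": " ++
      PySem.Int.toStr (1 + ((t.takeWhile (fun x => x == k)).length : Int)) ++ " rows")
      :: pvGrpL (t.dropWhile (fun x => x == k))
  termination_by l => l.length
  decreasing_by
    exact Nat.lt_succ_of_le (List.Sublist.length_le (List.dropWhile_sublist _))

theorem pvRuns_eq_grpL : ∀ S : List (List (String × Int)),
    pvRuns S = pvGrpL (S.map pyLevel)
  | [] => by rw [List.map_nil, pvRuns, pvGrpL]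
  | r :: t => by
    rw [pvRuns, List.map_cons, pvGrpL]
    have htw : (List.map pyLevel t).takeWhile (fun x => x == pyLevel r)
        = (t.takeWhile (fun x => pyLevel x == pyLevel r)).map pyLevel := by
      rw [List.takeWhile_map]; rfl
    have hdw : (List.map pyLevel t).dropWhile (fun x => x == pyLevel r)
        = (t.dropWhile (fun x => pyLevel x == pyLevel r)).map pyLevel := by
      rw [List.dropWhile_map]; rfl
    rw [htw, hdw, List.length_map]
    exact congrArg _ (pvRuns_eq_grpL (t.dropWhile (fun x => pyLevel x == pyLevel r)))
  termination_by S => S.length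
  decreasing_by
    exact Nat.lt_succ_of_le (List.Sublist.length_le (List.dropWhile_sublist _))

-- on a non-decreasing level list the grouped scan yields one entry per distinct level with its count
theorem pvGrpL_spec : ∀ l : List Int, l.Pairwise (· ≤ ·) →
    pvGrpL l = (PySem.Set.ofList l).map
      (fun k => "L" ++ PySem.Int.toStr k ++ ": " ++ PySem.Int.toStr ((l.count k : Int)) ++ " rows")
  | [], _ => by rw [pvGrpL]; rfl
  | k :: t, hp => by
    have hrun : ∀ x ∈ t.takeWhile (fun x => x == k), x = k := by
      intro x hx
      simpa using List.mem_takeWhile_imp hx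
    have hsplit : t.takeWhile (fun x => x == k) ++ t.dropWhile (fun x => x == k) = t :=
      List.takeWhile_append_dropWhile
    have hp' := List.pairwise_cons.1 hp
    have hrest_pair : (t.dropWhile (fun x => x == k)).Pairwise (· ≤ ·) :=
      List.Pairwise.sublist (List.dropWhile_sublist _) hp'.2
    have hkrest : k ∉ t.dropWhile (fun x => x == k) :=
      pv_not_mem_dropWhile k t hp'.1 hp'.2
    have h0 : (t.dropWhile (fun x => x == k)).count k = 0 := List.count_eq_zero.2 hkrest
    have hl : (t.takeWhile (fun x => x == k)).count k = (t.takeWhile (fun x => x == k)).length :=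
      List.count_eq_length.2 (fun b hb => by simp [hrun b hb])
    have hcount : (k :: t).count k = (t.takeWhile (fun x => x == k)).length + 1 := by
      calc (k :: t).count k = t.count k + 1 := List.count_cons_self
        _ = (t.takeWhile (fun x => x == k) ++ t.dropWhile (fun x => x == k)).count k + 1 := by
              conv_lhs => rw [← hsplit]
        _ = (t.takeWhile (fun x => x == k)).length + 1 := by
              rw [List.count_append, h0, hl]
    have hofl : PySem.Set.ofList (k :: t)
        = k :: PySem.Set.ofList (t.dropWhile (fun x => x == k)) := by
      conv_lhs => rw [← hsplit]
      exact pv_ofList_cons_run k _ _ hrun hkrest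
    rw [pvGrpL, hofl, List.map_cons]
    congr 1
    · have : ((k :: t).count k : Int) = 1 + ((t.takeWhile (fun x => x == k)).length : Int) := by
        rw [hcount]; push_cast; ring
      rw [this]
    · rw [pvGrpL_spec (t.dropWhile (fun x => x == k)) hrest_pair]
      apply List.map_congr_left
      intro a ha
      have har : a ∈ t.dropWhile (fun x => x == k) := (PySem.Set.mem_ofList _ a).1 ha
      have hak : a ≠ k := fun e => hkrest (e ▸ har)
      have hca : (k :: t).count a = (t.dropWhile (fun x => x == k)).count a := by
        rw [List.count_cons_of_ne (Ne.symm hak)]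
        conv_lhs => rw [← hsplit]
        rw [List.count_append, List.count_eq_zero.2 (fun hm => hak (hrun a hm))]
        omega
      rw [hca]
  termination_by l => l.length
  decreasing_by
    exact Nat.lt_succ_of_le (List.Sublist.length_le (List.dropWhile_sublist _))

theorem pvA_items (rows : List (List (String × Int))) :
    rows.foldl (fun d row => d.insert (pyLevel row) (d.getD (pyLevel row) 0 + 1)) PySem.Dict.empty
      = PySem.Dict.counter (rows.map pyLevel) := by
  rw [← PySem.Dict.foldl_insert_getD_add_one_eq_counter, List.foldl_map]

theorem pvA_parts (lv : List Int) :
    PySem.List.sorted2 (PySem.Dict.counter lv).items Prod.fst Prod.snd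
      = (PySem.List.sorted (PySem.Set.ofList lv) (fun x => x)).map
          (fun k => (k, (lv.count k : Int))) := by
  rw [PySem.Dict.items_counter]
  rw [pv_sorted2_eq_sorted_fst]
  · apply PySem.List.sorted_eq_of_perm_of_pairwise_lt
    · exact (PySem.List.sorted_perm (PySem.Set.ofList lv) (fun x => x) false).map _
    · exact List.pairwise_map.2 (by simpa using PySem.List.sorted_ofList_pairwise_lt lv)
  · intro a ha b hb he
    obtain ⟨ka, -, rfl⟩ := List.mem_map.1 ha
    obtain ⟨kb, -, rfl⟩ := List.mem_map.1 hb
    simp only at he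
    simp [he]

theorem pvB_msl (rows : List (List (String × Int))) :
    (PySem.List.sorted rows pyLevel).map pyLevel
      = PySem.List.sorted (rows.map pyLevel) (fun x => x) := by
  symm
  apply PySem.List.sorted_id_eq_of_perm_of_pairwise
  · exact (PySem.List.sorted_perm rows pyLevel false).map pyLevel
  · exact PySem.List.sorted_map_key_pairwise rows pyLevel

theorem pv_ofList_sorted (lv : List Int) :
    PySem.Set.ofList (PySem.List.sorted lv (fun x => x))
      = PySem.List.sorted (PySem.Set.ofList lv) (fun x => x) := by
  symm
  apply PySem.List.sorted_id_eq_of_perm_of_pairwise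
  · apply (List.perm_ext_iff_of_nodup (PySem.Set.nodup_ofList _) (PySem.Set.nodup_ofList _)).2
    intro a
    rw [PySem.Set.mem_ofList, PySem.Set.mem_ofList, PySem.List.mem_sorted]
  · exact List.Pairwise.sublist (pv_ofList_sublist _)
      (PySem.List.sorted_pairwise lv (fun x => x))

-- ===== VERDICT (by name: the statement is the Claim_ definition above) =====
theorem build_dryrun_html_py_spec : Claim_equal_build_dryrun_html_py := by
  intro rows _ _
  unfold Spec_build_dryrun_html_py
  simp only [build_dryrun_html_py, build_dryrun_html_py_alt]
  rw [pvA_items]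
  have hparts :
      (PySem.List.sorted2 (PySem.Dict.counter (rows.map pyLevel)).items Prod.fst Prod.snd).map
          (fun kv => "L" ++ PySem.Int.toStr kv.1 ++ ": " ++ PySem.Int.toStr kv.2 ++ " rows")
        = pvRuns (PySem.List.sorted rows pyLevel) := by
    have hsortpair : (PySem.List.sorted (rows.map pyLevel) (fun x => x)).Pairwise (· ≤ ·) := by
      simpa using PySem.List.sorted_pairwise (rows.map pyLevel) (fun x => x)
    rw [pvA_parts, pvRuns_eq_grpL, pvB_msl, pvGrpL_spec _ hsortpair, pv_ofList_sorted,
      List.map_map]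
    apply List.map_congr_left
    intro k _
    simp only [Function.comp]
    rw [(PySem.List.sorted_perm (rows.map pyLevel) (fun x => x) false).count_eq k]
  rw [hparts]
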